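-- pv_equiv track=rewrite | github.com/pypi-data/pypi-mirror-400 | packages/rowsncolumns-spreadsheet/rowsncolumns_spreadsheet-0.1.8.tar.gz/rowsncolumns_spreadsheet-0.1.8/rowsncolumns_spreadsheet/sheet_cell_helpers.py | get_next_table_column_name
-- ===== SOURCE A (Python) =====
-- from typing import Any, List, Optional, TYPE_CHECKING, TypeVar, Union
--
-- def get_next_table_column_name(columns: Optional[List[dict]] = None) -> str:
--     """
--     Get unique table column name.
--
--     Generates the next available "ColumnN" name where N is an incrementing number.
--
--     Args:
--         columns: List of existing column dictionaries with 'name' key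
--
--     Returns:
--         Next available column name (e.g., "Column1", "Column2", etc.)
--
--     Example:
--         >>> columns = [{"name": "Column1"}, {"name": "Column2"}]
--         >>> get_next_table_column_name(columns)
--         'Column3'
--     """
--     if not columns:
--         return "Column1"
--
--     i = 1
--     existing_names = {col.get("name") for col in columns}
--     while f"Column{i}" in existing_names:
--         i += 1
--
--     return f"Column{i}"
-- ===== SOURCE B (Python) =====
-- def get_next_table_column_name(columns=None):
--     # The answer is always one of Column1..Column{n+1}, so build a reverse
--     # lookup from those candidate names to their index, collect the indices
--     # that are already taken, and gap-scan the sorted indices for the first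
--     # free one.
--     cols = columns or []
--     canonical = {f"Column{i}": i for i in range(1, len(cols) + 2)}
--     used = set()
--     for col in cols:
--         name = col.get("name")
--         if name in canonical:
--             used.add(canonical[name])
--     expected = 1
--     for n in sorted(used):
--         if n == expected:
--             expected += 1
--         else:
--             break
--     return f"Column{expected}"
-- ===== Notes on version B (the rewrite author's own statement) =====
-- stated objective: alternative
-- what changed: Replaces A's unbounded generate-and-test while loop (try Column1, Column2, ... against the name set) by a reverse-lookup dict over the n+1 possible candidate names Column1..Column{n+1}, collecting the indices already taken and gap-scanning their sorted list for the first free index.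
import Mathlib
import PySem

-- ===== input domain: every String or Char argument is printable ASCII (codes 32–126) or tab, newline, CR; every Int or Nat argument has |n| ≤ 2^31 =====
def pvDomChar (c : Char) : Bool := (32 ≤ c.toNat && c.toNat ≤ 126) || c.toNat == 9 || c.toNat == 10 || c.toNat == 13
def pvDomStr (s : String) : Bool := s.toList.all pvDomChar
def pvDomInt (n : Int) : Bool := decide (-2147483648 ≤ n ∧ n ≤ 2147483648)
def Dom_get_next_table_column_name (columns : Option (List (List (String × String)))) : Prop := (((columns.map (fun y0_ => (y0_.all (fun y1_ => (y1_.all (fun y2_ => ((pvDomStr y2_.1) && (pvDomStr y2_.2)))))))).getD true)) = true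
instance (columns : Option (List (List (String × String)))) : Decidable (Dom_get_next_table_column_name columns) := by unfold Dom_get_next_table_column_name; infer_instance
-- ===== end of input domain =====

-- B replaces A's unbounded generate-and-test while loop by a reverse-lookup dict over the n+1
-- candidate names Column1..Column{n+1}, collecting the indices already taken and gap-scanning
-- their sorted list for the first free index; proved equal on all inputs.

-- ===== PORT A =====
-- the while loop 'while f"Column{i}" in existing_names: i += 1', with fuel |existing_names|+1
-- (proved sufficient below: the loop only steps through distinct members of the set)
def pvALoop (names : PySem.Set (Option String)) : Nat → Int → Int
  | 0, i => i
  | f + 1, i =>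
    if (some ("Column" ++ PySem.Int.toStr i)) ∈ names then pvALoop names f (i + 1) else i

def get_next_table_column_name (columns : Option (List (List (String × String)))) : String :=
  match columns with
  | none => "Column1"
  | some cols =>
    if cols.isEmpty then "Column1"
    else
      let existing_names : PySem.Set (Option String) :=
        PySem.Set.ofList (cols.map (fun col => (PySem.Dict.mk col).get? "name"))
      let i := pvALoop existing_names (existing_names.length + 1) 1
      "Column" ++ PySem.Int.toStr i

-- ===== PORT B =====
-- loop body of 'for col in cols: name = col.get("name"); if name in canonical: used.add(canonical[name])'
def pvUsedStep (canonical : PySem.Dict String Int) (s : PySem.Set Int)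
    (col : List (String × String)) : PySem.Set Int :=
  match (PySem.Dict.mk col).get? "name" with
  | some name =>
    match canonical.get? name with
    | some i => PySem.Set.add s i
    | none => s
  | none => s

-- 'for n in sorted(used): if n == expected: expected += 1 else: break'
def pvGapScan : List Int → Int → Int
  | [], e => e
  | n :: t, e => if n = e then pvGapScan t (e + 1) else e

def get_next_table_column_name_alt (columns : Option (List (List (String × String)))) : String :=
  let cols := columns.getD []
  -- canonical = {f"Column{i}": i for i in range(1, len(cols) + 2)}
  let canonical : PySem.Dict String Int :=
    (PySem.List.pyRange 1 ((cols.length : Int) + 2) 1).foldl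
      (fun d i => d.insert ("Column" ++ PySem.Int.toStr i) i) PySem.Dict.empty
  let used : PySem.Set Int := cols.foldl (pvUsedStep canonical) PySem.Set.empty
  let expected := pvGapScan (PySem.List.sorted used (fun x => x) false) 1
  "Column" ++ PySem.Int.toStr expected

-- ===== PRECONDITION & SPEC =====
def Spec_get_next_table_column_name (columns : Option (List (List (String × String)))) (out : String) : Prop := out = get_next_table_column_name_alt columns
instance (columns : Option (List (List (String × String)))) (out : String) : Decidable (Spec_get_next_table_column_name columns out) := by unfold Spec_get_next_table_column_name; infer_instance

-- ===== CLAIM (what is proved, stated in full; the proofs are below) =====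
def Claim_equal_get_next_table_column_name : Prop := ∀ (columns : Option (List (List (String × String)))), Dom_get_next_table_column_name columns → Spec_get_next_table_column_name columns (get_next_table_column_name columns)

-- ===== LEMMAS AND PROOFS =====

-- decimal digit strings, used only to prove that i ↦ "Column" ++ str(i) is injective
def pvDigs (n : Nat) : List Char :=
  if _h : n < 10 then [Nat.digitChar n]
  else pvDigs (n / 10) ++ [Nat.digitChar (n % 10)]
  decreasing_by exact Nat.div_lt_self (by omega) (by omega)

def pvVal (cs : List Char) : Int := cs.foldl (fun n ch => n * 10 + ((ch.toNat : Int) - 48)) 0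

theorem pv_toDigitsCore_eq (f : Nat) : ∀ n ds, n < f →
    Nat.toDigitsCore 10 f n ds = pvDigs n ++ ds := by
  induction f with
  | zero => intro n ds h; omega
  | succ f ih =>
    intro n ds h
    rw [Nat.toDigitsCore]
    by_cases h10 : n < 10
    · have : n / 10 = 0 := Nat.div_eq_of_lt h10
      simp [this, pvDigs, h10, Nat.mod_eq_of_lt h10]
    · have hne : ¬ n / 10 = 0 := by
        intro hz; omega
      simp only [hne, if_false]
      rw [ih (n / 10) _ (by omega)]
      conv_rhs => rw [pvDigs]
      simp [h10]

theorem pv_toChars_eq (i : Int) (h : 0 ≤ i) : PySem.Int.toChars i = pvDigs i.toNat := by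
  unfold PySem.Int.toChars
  rw [if_neg (by omega)]
  exact pv_toDigitsCore_eq (i.toNat + 1) i.toNat [] (by omega) |>.trans (by simp)

theorem pv_digitChar_lt10 (d : Nat) (h : d < 10) : (Nat.digitChar d).toNat = 48 + d := by
  interval_cases d <;> rfl

theorem pvVal_append_singleton (cs : List Char) (c : Char) :
    pvVal (cs ++ [c]) = pvVal cs * 10 + ((c.toNat : Int) - 48) := by
  simp [pvVal, List.foldl_append]

theorem pvVal_pvDigs (n : Nat) : pvVal (pvDigs n) = n := by
  induction n using Nat.strong_induction_on with
  | _ n ih =>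
    rw [pvDigs]
    by_cases h10 : n < 10
    · rw [dif_pos h10]
      simp [pvVal, pv_digitChar_lt10 n h10]
    · rw [dif_neg h10]
      rw [pvVal_append_singleton, ih (n / 10) (Nat.div_lt_self (by omega) (by omega)),
        pv_digitChar_lt10 (n % 10) (by omega)]
      push_cast
      omega

-- injectivity of i ↦ "Column" ++ str(i) on the nonnegatives
theorem pv_name_inj (i j : Int) (hi : 0 ≤ i) (hj : 0 ≤ j)
    (h : ("Column" ++ PySem.Int.toStr i) = ("Column" ++ PySem.Int.toStr j)) : i = j := by
  have hl : ("Column".toList ++ PySem.Int.toChars i) = ("Column".toList ++ PySem.Int.toChars j) := by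
    have := congrArg String.toList h
    simpa [PySem.Int.toList_toStr] using this
  have hts : PySem.Int.toChars i = PySem.Int.toChars j := List.append_cancel_left hl
  rw [pv_toChars_eq i hi, pv_toChars_eq j hj] at hts
  have hv := congrArg pvVal hts
  rw [pvVal_pvDigs, pvVal_pvDigs] at hv
  omega

-- gap-scan characterization: on a strictly increasing list of values ≥ e it returns the
-- least value ≥ e that is not in the list
theorem pvGapScan_spec (l : List Int) (e : Int) (hl : l.Pairwise (· < ·))
    (hge : ∀ x ∈ l, e ≤ x) :
    e ≤ pvGapScan l e ∧ pvGapScan l e ∉ l ∧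
      ∀ j, e ≤ j → j < pvGapScan l e → j ∈ l := by
  induction l generalizing e with
  | nil =>
    have he : pvGapScan [] e = e := rfl
    exact ⟨he.ge, by simp, fun j h1 h2 => by rw [he] at h2; omega⟩
  | cons n t ih =>
    have hlt : ∀ x ∈ t, n < x := (List.pairwise_cons.mp hl).1
    have ht : t.Pairwise (· < ·) := (List.pairwise_cons.mp hl).2
    have hne : e ≤ n := hge n List.mem_cons_self
    rw [pvGapScan]
    by_cases hn : n = e
    · rw [if_pos hn]
      obtain ⟨ih1, ih2, ih3⟩ := ih (e + 1) ht (fun x hx => by have := hlt x hx; omega)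
      refine ⟨by omega, ?_, ?_⟩
      · intro hmem
        rcases List.mem_cons.mp hmem with hh | hh
        · omega
        · exact ih2 hh
      · intro j h1 h2
        by_cases hje : j = e
        · subst hje; subst hn; exact List.mem_cons_self
        · exact List.mem_cons_of_mem n (ih3 j (by omega) h2)
    · rw [if_neg hn]
      refine ⟨le_refl e, ?_, fun j h1 h2 => by omega⟩
      intro hmem
      rcases List.mem_cons.mp hmem with hh | hh
      · omega
      · exact absurd (hlt e hh) (by omega)

-- A's while loop returns m (the least non-member ≥ i) when the fuel reaches it
theorem pvALoop_spec (names : PySem.Set (Option String)) (m : Int)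
    (hm : (some ("Column" ++ PySem.Int.toStr m)) ∉ names) :
    ∀ (f : Nat) (i : Int), i ≤ m → m < i + f →
    (∀ j, i ≤ j → j < m → (some ("Column" ++ PySem.Int.toStr j)) ∈ names) →
    pvALoop names f i = m := by
  intro f
  induction f with
  | zero => intro i h1 h2 _; omega
  | succ f ih =>
    intro i h1 h2 hall
    rw [pvALoop]
    by_cases him : i = m
    · subst him
      rw [if_neg hm]
    · have hilt : i < m := by omega
      rw [if_pos (hall i (le_refl i) hilt)]
      exact ih (i + 1) (by omega) (by omega) (fun j hj1 hj2 => hall j (by omega) hj2)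

theorem pv_mem_foldl_used (d : PySem.Dict String Int) (l : List (List (String × String)))
    (s : PySem.Set Int) (x : Int) :
    x ∈ l.foldl (pvUsedStep d) s ↔ x ∈ s ∨
      ∃ col ∈ l, ∃ nm, (PySem.Dict.mk col).get? "name" = some nm ∧ d.get? nm = some x := by
  induction l generalizing s with
  | nil => simp
  | cons c t ih =>
    rw [List.foldl_cons, ih]
    have hstep : ∀ y : Int, y ∈ pvUsedStep d s c ↔ y ∈ s ∨
        (∃ nm, (PySem.Dict.mk c).get? "name" = some nm ∧ d.get? nm = some y) := by
      intro y
      rcases hg : (PySem.Dict.mk c).get? "name" with _ | nm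
      · simp [pvUsedStep, hg]
      · rcases hd : d.get? nm with _ | i
        · simp [pvUsedStep, hg, hd]
        · have hred : pvUsedStep d s c = PySem.Set.add s i := by
            simp [pvUsedStep, hg, hd]
          rw [hred, PySem.Set.mem_add]
          constructor
          · rintro (hy | rfl)
            · exact Or.inl hy
            · exact Or.inr ⟨nm, rfl, hd⟩
          · rintro (hy | ⟨nm', hnm', hd'⟩)
            · exact Or.inl hy
            · cases Option.some_inj.mp hnm'
              rw [hd] at hd'
              exact Or.inr (Option.some_inj.mp hd').symm
    constructor
    · rintro (hy | ⟨col, hcol, hp⟩)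
      · rcases (hstep x).mp hy with hy | ⟨nm, h1, h2⟩
        · exact Or.inl hy
        · exact Or.inr ⟨c, List.mem_cons_self, nm, h1, h2⟩
      · exact Or.inr ⟨col, List.mem_cons_of_mem c hcol, hp⟩
    · rintro (hy | ⟨col, hcol, nm, h1, h2⟩)
      · exact Or.inl ((hstep x).mpr (Or.inl hy))
      · rcases List.mem_cons.mp hcol with rfl | hcol'
        · exact Or.inl ((hstep x).mpr (Or.inr ⟨nm, h1, h2⟩))
        · exact Or.inr ⟨col, hcol', nm, h1, h2⟩

theorem pv_nodup_foldl_used (d : PySem.Dict String Int) (l : List (List (String × String)))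
    (s : PySem.Set Int) (hs : s.Nodup) : (l.foldl (pvUsedStep d) s).Nodup := by
  induction l generalizing s with
  | nil => exact hs
  | cons c t ih =>
    rw [List.foldl_cons]
    apply ih
    rcases hg : (PySem.Dict.mk c).get? "name" with _ | nm
    · simpa [pvUsedStep, hg] using hs
    · rcases hd : d.get? nm with _ | i
      · simpa [pvUsedStep, hg, hd] using hs
      · have hred : pvUsedStep d s c = PySem.Set.add s i := by
          simp [pvUsedStep, hg, hd]
        rw [hred]
        exact PySem.Set.nodup_add s i hs

theorem pv_ofList_length_le {α : Type} [BEq α] [LawfulBEq α] (l : List α) :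
    (PySem.Set.ofList l).length ≤ l.length := by
  have key : ∀ (l : List α) (s : PySem.Set α),
      (l.foldl PySem.Set.add s).length ≤ s.length + l.length := by
    intro l
    induction l with
    | nil => intro s; simp
    | cons a t ih =>
      intro s
      rw [List.foldl_cons]
      calc (t.foldl PySem.Set.add (PySem.Set.add s a)).length
          ≤ (PySem.Set.add s a).length + t.length := ih _
        _ ≤ s.length + (t.length + 1) := by
            rw [PySem.Set.add_eq_ite]
            split_ifs with hmem
            · omega
            · simp only [List.length_append, List.length_singleton]
              omega
        _ = s.length + (a :: t).length := by simp
  rw [PySem.Set.ofList_eq_foldl]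
  simpa using key l PySem.Set.empty

theorem pv_ports_agree (columns : Option (List (List (String × String)))) :
    get_next_table_column_name columns = get_next_table_column_name_alt columns := by
  have hcol1 : ("Column1" : String) = "Column" ++ PySem.Int.toStr 1 := by decide
  match columns with
  | none =>
    have hB : get_next_table_column_name_alt none = "Column" ++ PySem.Int.toStr 1 := by decide
    exact hcol1.trans hB.symm
  | some cols =>
    by_cases hemp : cols.isEmpty
    · have hnil : cols = [] := List.isEmpty_iff.mp hemp
      subst hnil
      have hB : get_next_table_column_name_alt (some []) = "Column" ++ PySem.Int.toStr 1 := by decide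
      simp only [get_next_table_column_name]
      exact hcol1.trans hB.symm
    · -- abbreviations
      set N : Int := (cols.length : Int) + 2 with hN
      set R := PySem.List.pyRange 1 N 1 with hR
      set names : PySem.Set (Option String) :=
        PySem.Set.ofList (cols.map (fun col => (PySem.Dict.mk col).get? "name")) with hnames
      set canonical : PySem.Dict String Int :=
        R.foldl (fun d i => d.insert ("Column" ++ PySem.Int.toStr i) i) PySem.Dict.empty
        with hcanon
      set used : PySem.Set Int := cols.foldl (pvUsedStep canonical) PySem.Set.empty with hused
      set srt := PySem.List.sorted used (fun x => x) false with hsrt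
      -- canonical dict characterization
      have hRmem : ∀ x : Int, x ∈ R ↔ 1 ≤ x ∧ x < N := by
        intro x; rw [hR, PySem.List.mem_pyRange_one]
      have hRkeysNodup : (R.map (fun i => "Column" ++ PySem.Int.toStr i)).Nodup := by
        apply List.Nodup.map_on _ (by rw [hR]; exact PySem.List.nodup_pyRange_one 1 N)
        intro a ha b hb heq
        have ha' := (hRmem a).mp ha
        have hb' := (hRmem b).mp hb
        exact pv_name_inj a b (by omega) (by omega) heq
      have hitems : canonical.items
          = R.map (fun i => ("Column" ++ PySem.Int.toStr i, i)) := by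
        have h := PySem.Dict.items_foldl_insert_fresh R
          (fun i => "Column" ++ PySem.Int.toStr i) (fun i : Int => i) PySem.Dict.empty
          (fun a _ => PySem.Dict.contains_empty _) hRkeysNodup
        rw [hcanon]
        simpa using h
      have hkeysNodup : canonical.keys.Nodup := by
        have hk : canonical.keys = R.map (fun i => "Column" ++ PySem.Int.toStr i) := by
          simp [PySem.Dict.keys, hitems, List.map_map, Function.comp]
        rw [hk]; exact hRkeysNodup
      have hget : ∀ j : Int, 1 ≤ j → j < N →
          canonical.get? ("Column" ++ PySem.Int.toStr j) = some j := by
        intro j h1 h2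
        refine PySem.Dict.get?_of_mem_items canonical ?_ hkeysNodup
        rw [hitems]
        exact List.mem_map_of_mem ((hRmem j).mpr ⟨h1, h2⟩)
      have hsound : ∀ (s : String) (i : Int), canonical.get? s = some i →
          s = "Column" ++ PySem.Int.toStr i ∧ 1 ≤ i ∧ i < N := by
        intro s i hg
        have := PySem.Dict.mem_items_of_get?_eq_some canonical hg
        rw [hitems] at this
        obtain ⟨x, hx, hxe⟩ := List.mem_map.mp this
        have he1 : "Column" ++ PySem.Int.toStr x = s := congrArg Prod.fst hxe
        have he2 : x = i := congrArg Prod.snd hxe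
        subst he2
        exact ⟨he1.symm, (hRmem x).mp hx⟩
      -- membership transfer
      have hK : ∀ j : Int, j ∈ used ↔
          1 ≤ j ∧ j < N ∧ (some ("Column" ++ PySem.Int.toStr j)) ∈ names := by
        intro j
        rw [hused, pv_mem_foldl_used, hnames, PySem.Set.mem_ofList]
        constructor
        · rintro (hj | ⟨col, hcol, nm, h1, h2⟩)
          · simp at hj
          · obtain ⟨rfl, hb1, hb2⟩ := hsound nm j h2
            refine ⟨hb1, hb2, ?_⟩
            rw [← h1]
            exact List.mem_map_of_mem hcol
        · rintro ⟨h1, h2, hmem⟩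
          obtain ⟨col, hcol, heq⟩ := List.mem_map.mp hmem
          exact Or.inr ⟨col, hcol, "Column" ++ PySem.Int.toStr j, heq, hget j h1 h2⟩
      -- srt is strictly increasing, all ≥ 1
      have hnodup : used.Nodup := pv_nodup_foldl_used canonical cols PySem.Set.empty List.nodup_nil
      have hsnodup : srt.Nodup :=
        ((PySem.List.sorted_perm used (fun x => x) false).nodup_iff).mpr hnodup
      have hsle : srt.Pairwise (· ≤ ·) := by
        have := PySem.List.sorted_pairwise used (fun x => x)
        simpa using this
      have hslt : srt.Pairwise (· < ·) :=
        (List.Pairwise.and hsle hsnodup).imp (fun h => lt_of_le_of_ne h.1 h.2)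
      have hsmem : ∀ x : Int, x ∈ srt ↔ x ∈ used := fun x =>
        PySem.List.mem_sorted used (fun x => x) false x
      have hge : ∀ x ∈ srt, (1 : Int) ≤ x := by
        intro x hx
        exact ((hK x).mp ((hsmem x).mp hx)).1
      set m := pvGapScan srt 1 with hm
      obtain ⟨hm1, hm2, hm3⟩ := pvGapScan_spec srt 1 hslt hge
      -- every index below m is a used name
      have hall : ∀ j, 1 ≤ j → j < m → (some ("Column" ++ PySem.Int.toStr j)) ∈ names := by
        intro j h1 h2
        exact ((hK j).mp ((hsmem j).mp (hm3 j h1 h2))).2.2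
      -- pigeonhole: the m - 1 names below m are distinct members of the set
      have hfuel : m ≤ (names.length : Int) + 1 := by
        by_contra hge'
        rw [not_le] at hge'
        set L := (List.range (m - 1).toNat).map
          (fun k : Nat => some ("Column" ++ PySem.Int.toStr (1 + (k : Int)))) with hL
        have hsub : L ⊆ names := by
          intro o ho
          obtain ⟨k, hk, rfl⟩ := List.mem_map.mp ho
          rw [List.mem_range] at hk
          exact hall (1 + (k : Int)) (by omega) (by omega)
        have hLnodup : L.Nodup := by
          apply List.Nodup.map_on _ List.nodup_range
          intro a ha b hb heq
          have := pv_name_inj (1 + (a : Int)) (1 + (b : Int)) (by omega) (by omega)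
            (Option.some_inj.mp heq)
          omega
        have hlen : L.length = (m - 1).toNat := by simp [hL]
        have hle : L.length ≤ names.length := by
          classical
          calc L.length = L.toFinset.card := (List.toFinset_card_of_nodup hLnodup).symm
            _ ≤ names.toFinset.card := Finset.card_le_card (by
                intro x hx
                simp only [List.mem_toFinset] at hx ⊢
                exact hsub hx)
            _ ≤ names.length := names.toFinset_card_le
        omega
      have hnameslen : names.length ≤ cols.length := by
        have := pv_ofList_length_le (cols.map (fun col => (PySem.Dict.mk col).get? "name"))
        rw [← hnames] at this
        simpa using this
      -- m is a free index
      have hmnot : (some ("Column" ++ PySem.Int.toStr m)) ∉ names := by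
        intro hmem
        have hmN : m < N := by
          rw [hN]
          have : (names.length : Int) ≤ (cols.length : Int) := by exact_mod_cast hnameslen
          omega
        exact hm2 ((hsmem m).mpr ((hK m).mpr ⟨hm1, hmN, hmem⟩))
      have hloop : pvALoop names (names.length + 1) 1 = m :=
        pvALoop_spec names m hmnot (names.length + 1) 1 (by omega) (by push_cast; omega) hall
      have hA : get_next_table_column_name (some cols)
          = "Column" ++ PySem.Int.toStr (pvALoop names (names.length + 1) 1) := by
        simp only [get_next_table_column_name]
        rw [if_neg hemp, ← hnames]
      have hB : get_next_table_column_name_alt (some cols) = "Column" ++ PySem.Int.toStr m := by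
        simp only [get_next_table_column_name_alt, Option.getD_some]
        rfl
      rw [hA, hB, hloop]

-- ===== VERDICT (by name: the statement is the Claim_ definition above) =====
theorem get_next_table_column_name_spec : Claim_equal_get_next_table_column_name := by
  intro columns _
  exact pv_ports_agree columns
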